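-- pv_equiv track=rewrite | github.com/miladreihanpour-programmer/fatamorgana | src/excel_to_pdf.py | detect_group_ranges
-- ===== SOURCE A (Python) =====
-- SUBHEADERS = {"ESAURITO", "MANTENIMENTO", "ORDINE"}
--
-- def format_value(value: object) -> str:
--     if value is None:
--         return ""
--     if isinstance(value, float) and value.is_integer():
--         return str(int(value))
--     return str(value).strip()
--
-- def detect_group_ranges(header_row: list[str]) -> list[tuple[int, int, str]]:
--     starts: list[tuple[int, str]] = []
--     for index, value in enumerate(header_row):
--         label = format_value(value)
--         if label and label.upper() not in SUBHEADERS: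
--             starts.append((index, label))
--
--     if not starts:
--         return [(0, len(header_row) - 1, "Table")]
--
--     ranges: list[tuple[int, int, str]] = []
--     for i, (start_idx, label) in enumerate(starts):
--         end_idx = starts[i + 1][0] - 1 if i + 1 < len(starts) else len(header_row) - 1
--         ranges.append((start_idx, end_idx, label))
--     return ranges
-- ===== SOURCE B (Python) =====
-- SUBHEADERS = {"ESAURITO", "MANTENIMENTO", "ORDINE"}
--
-- def detect_group_ranges(header_row):
--     ranges = []
--     pending = None  # (start_index, label) of the last group header seen
--     for index, value in enumerate(header_row):
--         label = str(value).strip()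
--         if label and label.upper() not in SUBHEADERS:
--             if pending is not None:
--                 ranges.append((pending[0], index - 1, pending[1]))
--             pending = (index, label)
--     if pending is None:
--         return [(0, len(header_row) - 1, "Table")]
--     ranges.append((pending[0], len(header_row) - 1, pending[1]))
--     return ranges
-- ===== Notes on version B (the rewrite author's own statement) =====
-- stated objective: alternative
-- what changed: Replaces A's two-pass collect-starts-then-pair-by-index scheme with a single streaming pass that keeps one pending (start,label) and emits a closed range as soon as the next group header is found, flushing the pending range (or the Table default) at the end.
import Mathlib
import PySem

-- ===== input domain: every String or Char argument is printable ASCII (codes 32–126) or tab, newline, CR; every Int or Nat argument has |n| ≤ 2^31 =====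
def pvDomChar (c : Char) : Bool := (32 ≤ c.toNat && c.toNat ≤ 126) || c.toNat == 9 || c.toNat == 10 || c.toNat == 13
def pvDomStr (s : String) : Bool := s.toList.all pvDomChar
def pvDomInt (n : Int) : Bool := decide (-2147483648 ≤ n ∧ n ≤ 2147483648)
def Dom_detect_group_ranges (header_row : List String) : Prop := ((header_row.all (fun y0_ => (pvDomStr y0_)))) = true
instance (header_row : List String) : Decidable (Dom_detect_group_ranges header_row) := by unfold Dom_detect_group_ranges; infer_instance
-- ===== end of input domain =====

-- B replaces A's two-pass collect-starts-then-pair-by-index scheme with one streaming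
-- pass keeping a pending (start,label); same cost, different decomposition.

-- ===== PORT A =====
def pvSubheaders : List String := ["ESAURITO", "MANTENIMENTO", "ORDINE"]

-- format_value on a str argument: str(value).strip()
def pvFormatValue (value : String) : String := PySem.Str.strip value

-- body of A's first loop (collect the starts)
def pvStepA (starts : List (Int × String)) (p : Int × String) : List (Int × String) :=
  let label := pvFormatValue p.2
  if label ≠ "" ∧ ¬ pvSubheaders.contains (PySem.Str.upper label)
  then starts ++ [(p.1, label)] else starts

-- body of A's second loop (pair start i with start i+1); n = len(header_row)
def pvStepR (starts : List (Int × String)) (n : Int)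
    (ranges : List (Int × Int × String)) (q : Int × Int × String) : List (Int × Int × String) :=
  let end_idx : Int :=
    if q.1 + 1 < (starts.length : Int)
    then (((PySem.List.pyGet? starts (q.1 + 1)).getD (0, "")).1) - 1  -- starts[i+1][0]; in range under the guard
    else n - 1
  ranges ++ [(q.2.1, end_idx, q.2.2)]

def detect_group_ranges (header_row : List String) : List (Int × Int × String) :=
  let starts : List (Int × String) := (PySem.List.enumerate header_row).foldl pvStepA []
  if starts = [] then [(0, (header_row.length : Int) - 1, "Table")]
  else (PySem.List.enumerate starts).foldl (pvStepR starts (header_row.length : Int)) []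

-- ===== PORT B =====
-- body of B's single loop: state = (ranges so far, pending start)
def pvStepB (st : List (Int × Int × String) × Option (Int × String)) (p : Int × String) :
    List (Int × Int × String) × Option (Int × String) :=
  let label := PySem.Str.strip p.2
  if label ≠ "" ∧ ¬ pvSubheaders.contains (PySem.Str.upper label) then
    match st.2 with
    | none => (st.1, some (p.1, label))
    | some pend => (st.1 ++ [(pend.1, p.1 - 1, pend.2)], some (p.1, label))
  else st

def detect_group_ranges_alt (header_row : List String) : List (Int × Int × String) :=
  let st := (PySem.List.enumerate header_row).foldl pvStepB ([], none)
  match st.2 with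
  | none => [(0, (header_row.length : Int) - 1, "Table")]
  | some pend => st.1 ++ [(pend.1, (header_row.length : Int) - 1, pend.2)]

-- ===== PRECONDITION & SPEC =====
def Spec_detect_group_ranges (header_row : List String) (out : List (Int × Int × String)) : Prop := out = detect_group_ranges_alt header_row
instance (header_row : List String) (out : List (Int × Int × String)) : Decidable (Spec_detect_group_ranges header_row out) := by unfold Spec_detect_group_ranges; infer_instance

-- ===== CLAIM (what is proved, stated in full; the proofs are below) =====
def Claim_equal_detect_group_ranges : Prop := ∀ (header_row : List String), Dom_detect_group_ranges header_row → Spec_detect_group_ranges header_row (detect_group_ranges header_row)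

-- ===== LEMMAS AND PROOFS =====

-- the valid (index, label) pairs of the row, starting at index i
def pvValids : List String → Int → List (Int × String)
  | [], _ => []
  | v :: vs, i =>
    if PySem.Str.strip v ≠ "" ∧ ¬ pvSubheaders.contains (PySem.Str.upper (PySem.Str.strip v))
    then (i, PySem.Str.strip v) :: pvValids vs (i + 1)
    else pvValids vs (i + 1)

-- pair consecutive starts into ranges, last one ending at n-1
def pvPair : List (Int × String) → Int → List (Int × Int × String)
  | [], _ => []
  | [(s, l)], n => [(s, n - 1, l)]
  | (s, l) :: (s2, l2) :: rest, n => (s, s2 - 1, l) :: pvPair ((s2, l2) :: rest) n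

-- B's end-of-loop flush, as a function of the final state
def pvFinish (n : Int) (st : List (Int × Int × String) × Option (Int × String)) : List (Int × Int × String) :=
  match st.2 with
  | none => [(0, n - 1, "Table")]
  | some pend => st.1 ++ [(pend.1, n - 1, pend.2)]

-- A's first loop computes pvValids
theorem pvA_starts (vs : List String) (i : Int) (acc : List (Int × String)) :
    (PySem.List.enumerate vs i).foldl pvStepA acc = acc ++ pvValids vs i := by
  induction vs generalizing i acc with
  | nil => simp [PySem.List.enumerate_nil, pvValids]
  | cons v vs ih =>
    rw [PySem.List.enumerate_cons, List.foldl_cons]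
    by_cases h : PySem.Str.strip v ≠ "" ∧ ¬ pvSubheaders.contains (PySem.Str.upper (PySem.Str.strip v))
    · have hs : pvStepA acc (i, v) = acc ++ [(i, PySem.Str.strip v)] := by
        simp only [pvStepA, pvFormatValue]; rw [if_pos h]
      rw [hs, ih]
      simp only [pvValids]; rw [if_pos h]
      simp
    · have hs : pvStepA acc (i, v) = acc := by
        simp only [pvStepA, pvFormatValue]; rw [if_neg h]
      rw [hs, ih]
      simp only [pvValids]; rw [if_neg h]

-- A's second loop pairs the starts
theorem pvA_pair (n : Int) (starts : List (Int × String)) :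
    ∀ (suf pre : List (Int × String)) (acc : List (Int × Int × String)),
      pre ++ suf = starts → suf ≠ [] →
      (PySem.List.enumerate suf (pre.length : Int)).foldl (pvStepR starts n) acc
        = acc ++ pvPair suf n := by
  intro suf
  induction suf with
  | nil => intro _ _ _ hne; exact absurd rfl hne
  | cons x rest ih =>
    intro pre acc hsplit _
    rw [PySem.List.enumerate_cons, List.foldl_cons]
    obtain ⟨s, l⟩ := x
    cases rest with
    | nil =>
      have hguard : ¬ ((pre.length : Int) + 1 < (starts.length : Int)) := by
        subst hsplit
        simp only [List.length_append, List.length_cons, List.length_nil]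
        push_cast; omega
      have hs : pvStepR starts n acc ((pre.length : Int), s, l) = acc ++ [(s, n - 1, l)] := by
        simp only [pvStepR]; rw [if_neg hguard]
      rw [hs, PySem.List.enumerate_nil, List.foldl_nil]
      simp [pvPair]
    | cons y rest' =>
      obtain ⟨s2, l2⟩ := y
      have hget : PySem.List.pyGet? starts ((pre.length : Int) + 1) = some (s2, l2) := by
        subst hsplit
        have h1 : ((pre.length : Int) + 1) = ((pre.length : Int) + ((1 : Nat) : Int)) := by push_cast; ring
        rw [h1, PySem.List.pyGet?_append_right]
        simp
      have hguard : (pre.length : Int) + 1 < (starts.length : Int) := by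
        subst hsplit
        simp only [List.length_append, List.length_cons]
        push_cast; omega
      have hs : pvStepR starts n acc ((pre.length : Int), s, l) = acc ++ [(s, s2 - 1, l)] := by
        simp only [pvStepR]; rw [if_pos hguard, hget]; simp
      rw [hs]
      have hsplit' : (pre ++ [(s, l)]) ++ ((s2, l2) :: rest') = starts := by
        subst hsplit; simp
      have hrec := ih (pre ++ [(s, l)]) (acc ++ [(s, s2 - 1, l)]) hsplit' (by simp)
      have hl : (((pre ++ [(s, l)]).length : Nat) : Int) = (pre.length : Int) + 1 := by
        simp
      rw [hl] at hrec
      rw [hrec]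
      simp [pvPair]

-- B's loop with a pending start produces the paired ranges
theorem pvB_some (n : Int) (vs : List String) :
    ∀ (i : Int) (acc : List (Int × Int × String)) (s : Int) (l : String),
      pvFinish n ((PySem.List.enumerate vs i).foldl pvStepB (acc, some (s, l)))
        = acc ++ pvPair ((s, l) :: pvValids vs i) n := by
  induction vs with
  | nil => intro i acc s l; simp [PySem.List.enumerate_nil, pvValids, pvFinish, pvPair]
  | cons v vs ih =>
    intro i acc s l
    rw [PySem.List.enumerate_cons, List.foldl_cons]
    by_cases h : PySem.Str.strip v ≠ "" ∧ ¬ pvSubheaders.contains (PySem.Str.upper (PySem.Str.strip v))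
    · have hs : pvStepB (acc, some (s, l)) (i, v)
          = (acc ++ [(s, i - 1, l)], some (i, PySem.Str.strip v)) := by
        simp only [pvStepB]; rw [if_pos h]
      rw [hs, ih]
      simp only [pvValids]; rw [if_pos h]
      simp [pvPair]
    · have hs : pvStepB (acc, some (s, l)) (i, v) = (acc, some (s, l)) := by
        simp only [pvStepB]; rw [if_neg h]
      rw [hs, ih]
      simp only [pvValids]; rw [if_neg h]

-- B's loop from the initial state
theorem pvB_none (n : Int) (vs : List String) :
    ∀ (i : Int),
      pvFinish n ((PySem.List.enumerate vs i).foldl pvStepB ([], none))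
        = if pvValids vs i = [] then [(0, n - 1, "Table")] else pvPair (pvValids vs i) n := by
  induction vs with
  | nil => intro i; simp [PySem.List.enumerate_nil, pvValids, pvFinish]
  | cons v vs ih =>
    intro i
    rw [PySem.List.enumerate_cons, List.foldl_cons]
    by_cases h : PySem.Str.strip v ≠ "" ∧ ¬ pvSubheaders.contains (PySem.Str.upper (PySem.Str.strip v))
    · have hs : pvStepB ([], none) (i, v) = ([], some (i, PySem.Str.strip v)) := by
        simp only [pvStepB]; rw [if_pos h]
      rw [hs, pvB_some n vs (i + 1) [] i (PySem.Str.strip v)]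
      simp only [pvValids]; rw [if_pos h]
      simp
    · have hs : pvStepB ([], none) (i, v) = ([], none) := by
        simp only [pvStepB]; rw [if_neg h]
      rw [hs, ih]
      simp only [pvValids]; rw [if_neg h]

-- ===== VERDICT (by name: the statement is the Claim_ definition above) =====
theorem detect_group_ranges_spec : Claim_equal_detect_group_ranges := by
  intro header_row _
  unfold Spec_detect_group_ranges
  show detect_group_ranges header_row
      = pvFinish (header_row.length : Int) ((PySem.List.enumerate header_row).foldl pvStepB ([], none))
  rw [pvB_none (header_row.length : Int) header_row 0]
  unfold detect_group_ranges
  rw [pvA_starts header_row 0 [], List.nil_append]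
  by_cases hvs : pvValids header_row 0 = []
  · rw [if_pos hvs, if_pos hvs]
  · rw [if_neg hvs, if_neg hvs]
    have := pvA_pair (header_row.length : Int) (pvValids header_row 0)
      (pvValids header_row 0) [] [] (by simp) hvs
    simpa using this
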